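-- pv_equiv track=rewrite | github.com/wkweigel/DelScreeningTool | utils/toolkit.py | get_closest_match
-- ===== SOURCE A (Python) =====
-- def count_matching_characters(str1, str2):
-- 	"""Counts the number of matching characters between two strings of equal length."""
-- 	# Use a list comprehension to create a list of 0s and 1s
-- 	matching_characters = [1 if char1 == char2 else 0 for char1, char2 in zip(str1, str2)]
-- 	# Use the sum function to count the matching characters
-- 	count = sum(matching_characters)
-- 	return count
--
-- def get_closest_match(query_sequence, correct_sequence_list):
-- 	"""For an query sequence, find the closest matching sequence from a list of correct sequences.
--
-- 	Arguments
-- 	==========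
-- 	query_sequence: An encoding sequence with at least one error
-- 	correct_sequence_list: A list of the possible correct encoding sequences
--
-- 	Returns
-- 	=======
-- 	num_errors: An int value representing the total number of errors in the sequence.
-- 	best_match: A string corresponding to the closest matching correct sequence.
-- 	"""
-- 	score_dict={}
-- 	if query_sequence in correct_sequence_list: #If the sequence is correct
-- 		num_matches=len(query_sequence)
-- 		best_match=query_sequence
-- 	else:
-- 		for correct_sequence in correct_sequence_list:
-- 			score=count_matching_characters(correct_sequence, query_sequence)
-- 			score_dict[correct_sequence]=score
-- 		best_score=max(score_dict.values())
-- 		best_match=max(score_dict, key=lambda k: score_dict.get(k))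
-- 		num_matches=best_score
-- 	num_errors=len(query_sequence)-num_matches
--
-- 	return(num_errors, best_match)
-- ===== SOURCE B (Python) =====
-- def get_closest_match(query_sequence, correct_sequence_list):
--     """Single online pass keeping the best (first-wins) match; exact match returns immediately."""
--     if not correct_sequence_list:
--         raise ValueError("correct_sequence_list is empty")
--     best_score = -1
--     best_match = None
--     for seq in correct_sequence_list:
--         if seq == query_sequence:
--             return (0, seq)
--         score = sum(c1 == c2 for c1, c2 in zip(seq, query_sequence))
--         if score > best_score:
--             best_score = score
--             best_match = seq
--     return (len(query_sequence) - best_score, best_match)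
-- ===== Notes on version B (the rewrite author's own statement) =====
-- stated objective: simpler
-- what changed: Replaced the membership fast-path plus the build-a-score-dict-then-two-max-passes structure with one online first-wins argmax loop that early-returns on an exact match.
import Mathlib
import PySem

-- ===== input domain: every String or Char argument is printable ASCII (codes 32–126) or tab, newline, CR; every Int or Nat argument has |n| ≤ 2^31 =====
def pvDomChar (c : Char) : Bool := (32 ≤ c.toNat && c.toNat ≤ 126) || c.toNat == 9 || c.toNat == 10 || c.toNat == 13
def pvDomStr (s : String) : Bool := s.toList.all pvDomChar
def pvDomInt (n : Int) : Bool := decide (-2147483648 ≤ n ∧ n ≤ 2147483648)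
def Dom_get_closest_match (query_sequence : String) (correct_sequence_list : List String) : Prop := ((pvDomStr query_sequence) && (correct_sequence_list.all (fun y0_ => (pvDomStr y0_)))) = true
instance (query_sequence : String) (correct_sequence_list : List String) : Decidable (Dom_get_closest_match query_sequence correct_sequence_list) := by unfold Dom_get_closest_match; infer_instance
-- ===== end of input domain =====

-- B replaces A's membership fast-path + score dict + two max passes by one online first-wins argmax loop (simpler; same return value).

-- ===== PORT A =====
def count_matching_characters (str1 str2 : String) : Int :=
  let matching_characters := (str1.toList.zip str2.toList).map (fun p => if p.1 == p.2 then (1 : Int) else 0)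
  matching_characters.sum

def get_closest_match (query_sequence : String) (correct_sequence_list : List String) : Int × String :=
  if query_sequence ∈ correct_sequence_list then
    let num_matches := PySem.Str.len query_sequence
    (PySem.Str.len query_sequence - num_matches, query_sequence)
  else
    let score_dict : PySem.Dict String Int :=
      correct_sequence_list.foldl
        (fun d correct_sequence =>
          d.insert correct_sequence (count_matching_characters correct_sequence query_sequence))
        PySem.Dict.empty
    -- score_dict.get(k): every key iterated is present, so Python's .get never yields None; ported as getD _ _ 0 (exact here)
    match PySem.List.max? score_dict.values (fun v => v),
          PySem.List.max? score_dict.keys (fun k => score_dict.getD k 0) with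
    | some best_score, some best_match => (PySem.Str.len query_sequence - best_score, best_match)
    | _, _ => (0, "")   -- unreachable when correct_sequence_list ≠ [] (Python A raises ValueError on []; excluded by Pre_)

-- ===== PORT B =====
def gcm_score (seq query : String) : Int :=
  ((seq.toList.zip query.toList).countP (fun p => p.1 == p.2) : Nat)

def gcm_loop (query : String) : List String → Int → String → Int × String
  | [], best_score, best_match => (PySem.Str.len query - best_score, best_match)
  | seq :: rest, best_score, best_match =>
    if seq = query then (0, seq)
    else
      let score := gcm_score seq query
      if best_score < score then gcm_loop query rest score seq
      else gcm_loop query rest best_score best_match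

def get_closest_match_alt (query_sequence : String) (correct_sequence_list : List String) : Int × String :=
  -- on [] Python B raises ValueError (excluded by Pre_); the seed (-1, "") is replaced at the first element
  gcm_loop query_sequence correct_sequence_list (-1) ""

-- ===== PRECONDITION & SPEC =====
-- Pre_ excludes only the empty list, on which both Pythons raise ValueError (A via max([]), B via its explicit guard).
def Pre_get_closest_match (query_sequence : String) (correct_sequence_list : List String) : Prop :=
  correct_sequence_list ≠ []
instance (query_sequence : String) (correct_sequence_list : List String) : Decidable (Pre_get_closest_match query_sequence correct_sequence_list) := by unfold Pre_get_closest_match; infer_instance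

def pvWitness_get_closest_match : String × List String := ("ab", ["ac", "bb"])

def Spec_get_closest_match (query_sequence : String) (correct_sequence_list : List String) (out : Int × String) : Prop := out = get_closest_match_alt query_sequence correct_sequence_list
instance (query_sequence : String) (correct_sequence_list : List String) (out : Int × String) : Decidable (Spec_get_closest_match query_sequence correct_sequence_list out) := by unfold Spec_get_closest_match; infer_instance

-- ===== CLAIM (what is proved, stated in full; the proofs are below) =====
def Claim_equal_get_closest_match : Prop := ∀ (query_sequence : String) (correct_sequence_list : List String), Dom_get_closest_match query_sequence correct_sequence_list → Pre_get_closest_match query_sequence correct_sequence_list → Spec_get_closest_match query_sequence correct_sequence_list (get_closest_match query_sequence correct_sequence_list)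

-- ===== LEMMAS AND PROOFS =====

-- the running first-wins argmax step and its fold
def gcmStep (q : String) (m x : String) : String :=
  if gcm_score m q < gcm_score x q then x else m

def gcmAddIf (acc : List String) (x : String) : List String :=
  if x ∈ acc then acc else acc ++ [x]

-- the fresh keys appended by A's dict fold after a prefix K
def gcmExtras (K : List String) : List String → List String
  | [] => []
  | x :: l => if x ∈ K then gcmExtras K l else x :: gcmExtras (K ++ [x]) l

theorem gcm_any_beq_mem (K : List String) (x : String) :
    (K.any fun k => k == x) = decide (x ∈ K) := by
  induction K with
  | nil => simp
  | cons h t ih =>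
    by_cases hx : x = h
    · simp [List.any_cons, List.mem_cons, hx]
    · simp [List.any_cons, ih, List.mem_cons, hx, beq_eq_false_iff_ne.mpr (Ne.symm hx)]

theorem gcm_score_eq (s q : String) : count_matching_characters s q = gcm_score s q := by
  simp only [count_matching_characters, gcm_score]
  rw [← PySem.List.sum_map_ite_one_zero (fun p : Char × Char => p.1 == p.2)]

theorem gcm_loop_mem (q : String) : ∀ (l : List String) (bs : Int) (bm : String),
    q ∈ l → gcm_loop q l bs bm = (0, q) := by
  intro l
  induction l with
  | nil => intro bs bm h; cases h
  | cons x t ih =>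
    intro bs bm h
    by_cases hx : x = q
    · simp [gcm_loop, hx]
    · have ht : q ∈ t := by cases h with
        | head => exact absurd rfl hx
        | tail _ h => exact h
      simp only [gcm_loop, if_neg hx]
      split
      · exact ih _ _ ht
      · exact ih _ _ ht

theorem gcm_loop_run (q : String) : ∀ (l : List String) (a : String),
    (∀ x ∈ l, x ≠ q) →
    gcm_loop q l (gcm_score a q) a =
      (PySem.Str.len q - gcm_score (l.foldl (gcmStep q) a) q, l.foldl (gcmStep q) a) := by
  intro l
  induction l with
  | nil => intro a _; rfl
  | cons x t ih =>
    intro a h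
    have hx : x ≠ q := h x (by simp)
    have ht : ∀ y ∈ t, y ≠ q := fun y hy => h y (by simp [hy])
    simp only [gcm_loop, if_neg hx, List.foldl_cons, gcmStep]
    by_cases hlt : gcm_score a q < gcm_score x q
    · simpa [hlt] using ih x ht
    · simpa [hlt] using ih a ht

-- A's dict fold builds exactly the dedup-in-first-occurrence-order keys paired with their scores
theorem gcm_dict_items (q : String) : ∀ (l K : List String),
    (l.foldl (fun d s => d.insert s (gcm_score s q))
        (PySem.Dict.mk (K.map (fun k => (k, gcm_score k q))))).items
      = (l.foldl gcmAddIf K).map (fun k => (k, gcm_score k q)) := by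
  intro l
  induction l with
  | nil => intro K; rfl
  | cons x t ih =>
    intro K
    have hcont : (PySem.Dict.mk (K.map (fun k => (k, gcm_score k q)))).contains x = decide (x ∈ K) := by
      simp only [PySem.Dict.contains, List.any_map, Function.comp_def]
      exact gcm_any_beq_mem K x
    by_cases hx : x ∈ K
    · have hins : (PySem.Dict.mk (K.map (fun k => (k, gcm_score k q)))).insert x (gcm_score x q)
          = PySem.Dict.mk (K.map (fun k => (k, gcm_score k q))) := by
        simp only [PySem.Dict.insert, hcont, hx, decide_true, if_true]
        congr 1
        rw [List.map_map]
        apply List.map_congr_left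
        intro k _
        by_cases hk : k = x
        · subst hk; simp
        · simp [Function.comp, hk]
      simp only [List.foldl_cons, hins, ih, gcmAddIf, if_pos hx]
    · have hins : (PySem.Dict.mk (K.map (fun k => (k, gcm_score k q)))).insert x (gcm_score x q)
          = PySem.Dict.mk ((K ++ [x]).map (fun k => (k, gcm_score k q))) := by
        simp [PySem.Dict.insert, hcont, hx]
      simp only [List.foldl_cons, hins, ih, gcmAddIf, if_neg hx]

theorem gcm_getD_pair (q : String) : ∀ (K : List String) (k : String), k ∈ K →
    PySem.Dict.getD (PySem.Dict.mk (K.map (fun k => (k, gcm_score k q)))) k 0 = gcm_score k q := by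
  intro K
  induction K with
  | nil => intro k h; cases h
  | cons h t ih =>
    intro k hk
    by_cases hkh : h = k
    · subst hkh
      simp [PySem.Dict.getD, PySem.Dict.get?_mk_cons]
    · have ht : k ∈ t := by cases hk with
        | head => exact absurd rfl hkh
        | tail _ h => exact h
      have := ih k ht
      simp only [PySem.Dict.getD] at this ⊢
      simp only [List.map_cons, PySem.Dict.get?_mk_cons, beq_iff_eq, if_neg hkh]
      exact this

-- a seeded max? fold is the running-argmax fold
theorem gcm_max?_seed {α κ : Type} [LinearOrder κ] (key : α → κ) :
    ∀ (l : List α) (a : α),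
    l.foldl (fun acc x => match acc with
        | none => some x
        | some m => if key m < key x then some x else some m) (some a)
      = some (l.foldl (fun m x => if key m < key x then x else m) a) := by
  intro l
  induction l with
  | nil => intro a; rfl
  | cons x t ih =>
    intro a
    simp only [List.foldl_cons]
    by_cases hlt : key a < key x
    · simp only [if_pos hlt]; exact ih x
    · simp only [if_neg hlt]; exact ih a

theorem gcm_max?_cons {α κ : Type} [LinearOrder κ] (key : α → κ) (a : α) (t : List α) :
    PySem.List.max? (a :: t) key = some (t.foldl (fun m x => if key m < key x then x else m) a) := by
  simp only [PySem.List.max?, List.foldl_cons]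
  exact gcm_max?_seed key t a

theorem gcm_fold_congr {α κ : Type} [LinearOrder κ] (k1 k2 : α → κ) :
    ∀ (l : List α) (a : α), (∀ x ∈ l, k1 x = k2 x) → k1 a = k2 a →
    l.foldl (fun m x => if k1 m < k1 x then x else m) a
      = l.foldl (fun m x => if k2 m < k2 x then x else m) a := by
  intro l
  induction l with
  | nil => intro a _ _; rfl
  | cons x t ih =>
    intro a hmem ha
    have hx : k1 x = k2 x := hmem x (by simp)
    simp only [List.foldl_cons, hx, ha]
    by_cases hlt : k2 a < k2 x
    · simp only [if_pos hlt]; exact ih x (fun y hy => hmem y (by simp [hy])) hx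
    · simp only [if_neg hlt]; exact ih a (fun y hy => hmem y (by simp [hy])) ha

-- mapping the key out of the fold
theorem gcm_fold_map (q : String) : ∀ (t : List String) (a : String),
    (t.map (fun s => gcm_score s q)).foldl (fun m x => if m < x then x else m) (gcm_score a q)
      = gcm_score (t.foldl (gcmStep q) a) q := by
  intro t
  induction t with
  | nil => intro a; rfl
  | cons x l ih =>
    intro a
    simp only [List.map_cons, List.foldl_cons, gcmStep]
    by_cases hlt : gcm_score a q < gcm_score x q
    · simp only [if_pos hlt]; exact ih x
    · simp only [if_neg hlt]; exact ih a

theorem gcm_addIf_extras : ∀ (l K : List String), l.foldl gcmAddIf K = K ++ gcmExtras K l := by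
  intro l
  induction l with
  | nil => intro K; simp [gcmExtras]
  | cons x t ih =>
    intro K
    by_cases hx : x ∈ K
    · simp only [List.foldl_cons, gcmAddIf, if_pos hx, gcmExtras, ih]
    · simp only [List.foldl_cons, gcmAddIf, if_neg hx, gcmExtras, ih, List.append_assoc,
        List.singleton_append]

theorem gcm_extras_fold (q : String) : ∀ (l K : List String) (a : String),
    (∀ y ∈ K, gcm_score y q ≤ gcm_score a q) →
    (gcmExtras K l).foldl (gcmStep q) a = l.foldl (gcmStep q) a := by
  intro l
  induction l with
  | nil => intro K a _; rfl
  | cons x t ih =>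
    intro K a hK
    by_cases hx : x ∈ K
    · have hstep : gcmStep q a x = a := by
        simp [gcmStep, not_lt.mpr (hK x hx)]
      simp only [gcmExtras, if_pos hx, List.foldl_cons, hstep]
      exact ih K a hK
    · simp only [gcmExtras, if_neg hx, List.foldl_cons]
      apply ih
      intro y hy
      rcases List.mem_append.mp hy with hyK | hyx
      · calc gcm_score y q ≤ gcm_score a q := hK y hyK
          _ ≤ gcm_score (gcmStep q a x) q := by
            simp only [gcmStep]; split
            · exact le_of_lt (by assumption)
            · exact le_refl _
      · have : y = x := by simpa using hyx
        subst this
        simp only [gcmStep]; split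
        · exact le_refl _
        · exact not_lt.mp (by assumption)

theorem gcm_score_nonneg (s q : String) : 0 ≤ gcm_score s q := by
  simp [gcm_score]

-- ===== VERDICT (by name: the statement is the Claim_ definition above) =====
theorem get_closest_match_spec : Claim_equal_get_closest_match := by
  intro q lst _ hpre
  unfold Spec_get_closest_match
  by_cases hq : q ∈ lst
  · -- exact-match branch of A; B early-returns at the first occurrence
    simp only [get_closest_match, if_pos hq, get_closest_match_alt, gcm_loop_mem q lst _ _ hq,
      sub_self]
  · cases lst with
    | nil => exact absurd rfl hpre
    | cons h t =>
      have hh : h ≠ q := fun e => hq (e ▸ List.mem_cons_self)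
      have ht : ∀ x ∈ t, x ≠ q := fun x hx e => hq (e ▸ List.mem_cons_of_mem _ hx)
      -- B's side: the seed (-1,"") is replaced by the first element, then the argmax fold runs
      have hB : get_closest_match_alt q (h :: t)
          = (PySem.Str.len q - gcm_score (t.foldl (gcmStep q) h) q, t.foldl (gcmStep q) h) := by
        have hneg : (-1 : Int) < gcm_score h q := lt_of_lt_of_le (by norm_num) (gcm_score_nonneg h q)
        simp only [get_closest_match_alt, gcm_loop, if_neg hh, if_pos hneg]
        exact gcm_loop_run q t h ht
      -- A's side: the dict is the dedup list paired with scores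
      have hitems : ((h :: t).foldl (fun d s => d.insert s (gcm_score s q)) PySem.Dict.empty).items
          = ((h :: t).foldl gcmAddIf []).map (fun k => (k, gcm_score k q)) := by
        have := gcm_dict_items q (h :: t) []
        simpa [PySem.Dict.empty] using this
      have hD : (h :: t).foldl gcmAddIf [] = h :: gcmExtras [h] t := by
        simp [List.foldl_cons, gcmAddIf, gcm_addIf_extras t [h]]
      set D : List String := h :: gcmExtras [h] t with hDdef
      have hDfold : D = (h :: t).foldl gcmAddIf [] := hD.symm
      set d : PySem.Dict String Int :=
        (h :: t).foldl (fun d s => d.insert s (gcm_score s q)) PySem.Dict.empty with hd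
      have hitems' : d.items = D.map (fun k => (k, gcm_score k q)) := by
        rw [hitems, hD]
      have hkeys : d.keys = D := by
        simp [PySem.Dict.keys, hitems', List.map_map, Function.comp_def]
      have hvals : d.values = D.map (fun k => gcm_score k q) := by
        simp [PySem.Dict.values, hitems', List.map_map, Function.comp_def]
      -- the argmax over the dedup keys, with the dict key function, equals the argmax over the list
      have hargmax : (gcmExtras [h] t).foldl (gcmStep q) h = t.foldl (gcmStep q) h :=
        gcm_extras_fold q t [h] h (by intro y hy; simp at hy; subst hy; exact le_refl _)
      have hmaxK : PySem.List.max? d.keys (fun k => d.getD k 0)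
          = some (t.foldl (gcmStep q) h) := by
        rw [hkeys, hDdef, gcm_max?_cons]
        have hcongr : (gcmExtras [h] t).foldl
              (fun m x => if d.getD m 0 < d.getD x 0 then x else m) h
            = (gcmExtras [h] t).foldl (gcmStep q) h := by
          have hmemD : ∀ x ∈ D, d.getD x 0 = gcm_score x q := by
            intro x hx
            have : d = PySem.Dict.mk (D.map (fun k => (k, gcm_score k q))) := by
              cases hdd : d with
              | mk items => simp only [hdd] at hitems'; rw [hitems']
            rw [this]
            exact gcm_getD_pair q D x hx
          apply gcm_fold_congr
          · intro x hx
            exact hmemD x (by rw [hDdef]; exact List.mem_cons_of_mem _ hx)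
          · exact hmemD h (by rw [hDdef]; exact List.mem_cons_self)
        rw [hcongr, hargmax]
      have hmaxV : PySem.List.max? d.values (fun v => v)
          = some (gcm_score (t.foldl (gcmStep q) h) q) := by
        rw [hvals, hDdef, List.map_cons, gcm_max?_cons]
        have : ((gcmExtras [h] t).map (fun k => gcm_score k q)).foldl
              (fun m x => if m < x then x else m) (gcm_score h q)
            = gcm_score ((gcmExtras [h] t).foldl (gcmStep q) h) q := gcm_fold_map q _ h
        rw [this, hargmax]
      -- assemble A's else branch
      have hA : get_closest_match q (h :: t)
          = (PySem.Str.len q - gcm_score (t.foldl (gcmStep q) h) q, t.foldl (gcmStep q) h) := by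
        simp only [get_closest_match, if_neg hq]
        simp only [gcm_score_eq]
        rw [← hd, hmaxV, hmaxK]
      rw [hA, hB]
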